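-- pv_equiv track=rewrite | github.com/iebpr89/EDU | COS PRO 2급 Python_성안당/COS PRO 2급 Python_성안당/5회차/문제/solution-05-03_목재소의 매출액 구하는 함수 수정하기.py | solution
-- ===== SOURCE A (Python) =====
-- def func_a(a, length):
--     for i in range(len(a)):
--         if a[i] >= length:
--             return i
--     return -1
--
-- def solution(N, orders):
--     material = [0 for _ in range(N)]
--     k = 0
--     price = 0
--     for o in orders:
--         k = func_a(material, o)
--         if k >= 0:
--             material[k] -= o
--             price += 3000 * o
--     return price
-- ===== SOURCE B (Python) =====
-- def solution(N, orders):
--     if N <= 0: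
--         return 0
--     cap = 0
--     total = 0
--     for o in orders:
--         if cap >= o:
--             cap -= o
--             total += o
--     return 3000 * total
-- ===== Notes on version B (the rewrite author's own statement) =====
-- stated objective: faster
-- what changed: Only slot 0 of the material array can ever be selected (entries stay >= 0 and slots 1..N-1 stay 0), so B replaces the O(N) first-fit scan per order with a single capacity accumulator and one pass over orders.
import Mathlib
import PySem

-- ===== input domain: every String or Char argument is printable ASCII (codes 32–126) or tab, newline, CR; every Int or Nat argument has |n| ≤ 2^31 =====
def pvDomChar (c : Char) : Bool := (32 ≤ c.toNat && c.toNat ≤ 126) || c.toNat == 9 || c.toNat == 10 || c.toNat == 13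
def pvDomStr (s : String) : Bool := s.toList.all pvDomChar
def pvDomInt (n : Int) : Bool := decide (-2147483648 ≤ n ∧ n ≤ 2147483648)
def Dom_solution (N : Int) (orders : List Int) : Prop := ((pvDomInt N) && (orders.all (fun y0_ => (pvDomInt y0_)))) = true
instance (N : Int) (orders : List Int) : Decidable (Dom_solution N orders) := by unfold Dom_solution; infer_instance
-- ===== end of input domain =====

-- ===== PORT A =====
-- B changes: only slot 0 of the array can ever be selected, so B keeps one capacity accumulator (objective: faster, one pass over orders).
-- func_a: for i in range(len(a)): if a[i] >= length: return i; return -1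
def func_aGo (length : Int) : List Int → Int → Int
  | [], _ => -1
  | x :: xs, i => if x ≥ length then i else func_aGo length xs (i + 1)

def func_a (a : List Int) (length : Int) : Int := func_aGo length a 0

def solution (N : Int) (orders : List Int) : Int :=
  let material := (PySem.List.pyRange 0 N 1).map (fun _ => (0 : Int))
  let st := orders.foldl (fun (st : List Int × Int × Int) o =>
    let material := st.1
    let price := st.2.2
    let k := func_a material o
    if k ≥ 0 then
      (material.set k.toNat ((material.getD k.toNat 0) - o), k, price + 3000 * o)
    else
      (material, k, price)) (material, 0, 0)
  st.2.2

-- ===== PORT B =====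
def solution_alt (N : Int) (orders : List Int) : Int :=
  if N ≤ 0 then 0
  else
    let st := orders.foldl (fun (st : Int × Int) o =>
      if st.1 ≥ o then (st.1 - o, st.2 + o) else st) (0, 0)
    3000 * st.2

-- ===== PRECONDITION & SPEC =====
def Spec_solution (N : Int) (orders : List Int) (out : Int) : Prop := out = solution_alt N orders
instance (N : Int) (orders : List Int) (out : Int) : Decidable (Spec_solution N orders out) := by unfold Spec_solution; infer_instance

-- ===== CLAIM (what is proved, stated in full; the proofs are below) =====
def Claim_equal_solution : Prop := ∀ (N : Int) (orders : List Int), Dom_solution N orders → Spec_solution N orders (solution N orders)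

-- ===== LEMMAS AND PROOFS =====

-- ===== VERDICT (by name: the statement is the Claim_ definition above) =====
-- func_a on the zero slots after the head returns -1 for positive o
lemma func_aGo_zeros (o : Int) (ho : 0 < o) (m : Nat) (i : Int) :
    func_aGo o (List.replicate m 0) i = -1 := by
  induction m generalizing i with
  | zero => rfl
  | succ m ih => simp [List.replicate, func_aGo, ih]; omega

lemma func_a_head (cap o : Int) (hc : 0 ≤ cap) (m : Nat) :
    func_a (cap :: List.replicate m 0) o = if cap ≥ o then 0 else -1 := by
  unfold func_a func_aGo
  split_ifs with h
  · rfl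
  · exact func_aGo_zeros o (by omega) m 1

lemma loop_inv (orders : List Int) (m : Nat) (cap total k : Int) (hc : 0 ≤ cap) :
    (orders.foldl (fun (st : List Int × Int × Int) o =>
      let material := st.1
      let price := st.2.2
      let k := func_a material o
      if k ≥ 0 then
        (material.set k.toNat ((material.getD k.toNat 0) - o), k, price + 3000 * o)
      else
        (material, k, price)) (cap :: List.replicate m 0, k, 3000 * total)).2.2
    = 3000 * (orders.foldl (fun (st : Int × Int) o =>
        if st.1 ≥ o then (st.1 - o, st.2 + o) else st) (cap, total)).2 := by
  induction orders generalizing cap total k with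
  | nil => rfl
  | cons o os ih =>
    rw [List.foldl_cons, List.foldl_cons]
    simp only [func_a_head cap o hc m]
    by_cases h : cap ≥ o
    · simp only [if_pos h]
      simp only [show ((0:Int) ≥ 0) = True from by simp, if_true, Int.toNat_zero,
        List.set_cons_zero, List.getD_cons_zero]
      have := ih (cap - o) (total + o) 0 (by omega)
      rw [show 3000 * total + 3000 * o = 3000 * (total + o) from by ring]
      exact this
    · simp only [if_neg h]
      norm_num
      exact ih cap total (-1) hc

lemma loop_nil_material (orders : List Int) (k p : Int) :
    (orders.foldl (fun (st : List Int × Int × Int) o =>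
      let material := st.1
      let price := st.2.2
      let k := func_a material o
      if k ≥ 0 then
        (material.set k.toNat ((material.getD k.toNat 0) - o), k, price + 3000 * o)
      else
        (material, k, price)) ([], k, p)).2.2 = p := by
  induction orders generalizing k p with
  | nil => rfl
  | cons o os ih =>
    rw [List.foldl_cons]
    have : func_a ([] : List Int) o = -1 := rfl
    simp only [this]
    simpa using ih (-1) p

lemma replicate_of_range (N : Int) :
    (PySem.List.pyRange 0 N 1).map (fun _ => (0 : Int)) = List.replicate N.toNat 0 := by
  rw [PySem.List.pyRange_one]
  simp [List.map_map, Function.comp_def, List.map_const']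

-- ===== VERDICT =====
theorem solution_spec : Claim_equal_solution := by
  intro N orders _
  unfold Spec_solution solution solution_alt
  by_cases hN : N ≤ 0
  · have h0 : N.toNat = 0 := by omega
    simp only [replicate_of_range, h0, List.replicate, if_pos hN]
    exact loop_nil_material orders 0 0
  · have hm : List.replicate N.toNat (0 : Int) = 0 :: List.replicate (N.toNat - 1) 0 := by
      have h : N.toNat = (N.toNat - 1) + 1 := by omega
      rw [h]; rfl
    simp only [replicate_of_range, hm, if_neg hN]
    exact loop_inv orders (N.toNat - 1) 0 0 0 le_rfl
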